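-- pv_equiv track=rewrite | github.com/kna163/partitions | src/partitions/parti.py | next_part
-- ===== SOURCE A (Python) =====
-- Part = list[int]
--
-- def next_part(part : Part) -> Part | None :
--     # returns next part (same sum) under lexicographic ordering or None if it is of the form [n]
--     # case 1: ends with multiples
--     # case 2: ends with unique
--     # [4,4] -> [5,1,1,1] -> [5,2,1] -> [5,3] -> [6,1,1] -> [6,2] -> [7,1] -> [8]
--     # ex. [6,3,3] -> [6] + [4] + [1,1] ; [3,1] -> [4] ; [3,1,1,1] -> [3,2,1] -> [3,3]
--     # [2,2,1] -> [3,1,1]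
--     if len(part) < 2:
--         return None
--     if part[-1] == part[-2]: #case 1: multiples
--         prev = part[-1]
--         cnt = 1
--         for i in range(1,len(part)):
--             if part[-i-1] == prev:
--                 cnt += 1
--             else:
--                 break
--         return part[:-cnt] + [part[-cnt] + 1] + ((cnt-1)*prev-1)*[1]
--     prev = part[-2]
--     cnt = 1
--     for i in range(2,len(part)):
--         if part[-i-1] == prev:
--             cnt += 1
--         else:
--             break
--     ans = part[:-cnt-1] + [prev + 1] + ((cnt-1)*prev+part[-1]-1)*[1]
--     return ans
-- ===== SOURCE B (Python) =====
-- def next_part(part):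
--     # next partition in lexicographic order; None for lists shorter than 2.
--     # Build a run-length encoding of the whole list in one forward pass, do the
--     # pivot arithmetic on the runs, then expand the untouched runs back out.
--     if len(part) < 2:
--         return None
--     runs = []
--     for x in part:
--         if runs and runs[-1][0] == x:
--             runs[-1][1] += 1
--         else:
--             runs.append([x, 1])
--     carry, c = runs.pop()
--     if c == 1:
--         v, m = runs.pop()
--     else:
--         v, m = carry, c - 1
--     out = []
--     for val, cnt in runs:
--         out += [val] * cnt
--     return out + [v + 1] + (carry + (m - 1) * v - 1) * [1]
-- ===== Notes on version B (the rewrite author's own statement) =====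
-- stated objective: alternative
-- what changed: Instead of A's backward scans with negative indexing and two separate slice/replicate branches, B builds a run-length encoding of the whole list in one forward pass, pops one or two runs off that encoding to find the pivot and carry, and re-expands the remaining runs.
import Mathlib
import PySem

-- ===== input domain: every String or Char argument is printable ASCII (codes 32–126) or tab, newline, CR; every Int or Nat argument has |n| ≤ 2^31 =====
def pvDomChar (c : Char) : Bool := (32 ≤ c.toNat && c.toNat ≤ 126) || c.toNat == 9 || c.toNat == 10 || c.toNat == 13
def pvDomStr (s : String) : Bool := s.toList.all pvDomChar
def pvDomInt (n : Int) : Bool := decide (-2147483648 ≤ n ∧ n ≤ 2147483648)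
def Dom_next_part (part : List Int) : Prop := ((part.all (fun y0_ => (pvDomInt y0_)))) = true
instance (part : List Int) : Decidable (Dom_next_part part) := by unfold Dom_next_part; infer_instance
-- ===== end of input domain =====

-- B replaces A's backward scans and two slice branches by a forward run-length
-- encoding pass plus arithmetic on the runs (alternative); return values proved equal.

-- ===== PORT A =====
-- the 'for i in range(j, len(part)): if part[-i-1] == prev: cnt += 1 else: break' loop;
-- the index -i-1 is always in range here (1 ≤ i ≤ len-1), so pyGetD's default is never taken
def nextPartLoopA (part : List Int) (prev : Int) : List Int → Int → Int
  | [], cnt => cnt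
  | i :: rest, cnt =>
    if PySem.List.pyGetD part (-i - 1) 0 = prev then nextPartLoopA part prev rest (cnt + 1)
    else cnt

def next_part (part : List Int) : Option (List Int) :=
  if part.length < 2 then none
  else if PySem.List.pyGetD part (-1) 0 = PySem.List.pyGetD part (-2) 0 then
    -- case 1: multiples
    let prev := PySem.List.pyGetD part (-1) 0
    let cnt := nextPartLoopA part prev (PySem.List.pyRange 1 part.length 1) 1
    some (PySem.List.slice part none (some (-cnt)) ++
          [PySem.List.pyGetD part (-cnt) 0 + 1] ++
          List.replicate ((cnt - 1) * prev - 1).toNat 1)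
  else
    let prev := PySem.List.pyGetD part (-2) 0
    let cnt := nextPartLoopA part prev (PySem.List.pyRange 2 part.length 1) 1
    some (PySem.List.slice part none (some (-cnt - 1)) ++
          [prev + 1] ++
          List.replicate ((cnt - 1) * prev + PySem.List.pyGetD part (-1) 0 - 1).toNat 1)

-- ===== PORT B =====
-- Source B's 'if runs and runs[-1][0] == x: runs[-1][1] += 1 else: runs.append([x, 1])'
def addRun (runs : List (Int × Int)) (x : Int) : List (Int × Int) :=
  match runs.getLast? with
  | some (v, c) => if v = x then runs.dropLast ++ [(v, c + 1)] else runs ++ [(x, 1)]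
  | none => [(x, 1)]

-- Source B's 'out = []; for val, cnt in runs: out += [val] * cnt'
def expandRuns (runs : List (Int × Int)) : List Int :=
  runs.foldl (fun out p => out ++ List.replicate p.2.toNat p.1) []

def next_part_alt (part : List Int) : Option (List Int) :=
  if part.length < 2 then none
  else
    let runs := part.foldl addRun []
    match runs.getLast? with
    | none => none      -- unreachable: part is nonempty, so runs is nonempty
    | some (carry, c) =>
      let runs := runs.dropLast
      if c = 1 then
        match runs.getLast? with
        | none => none  -- unreachable: length ≥ 2 and last run of size 1 leave a run behind
        | some (v, m) =>
          some (expandRuns runs.dropLast ++ [v + 1] ++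
                List.replicate (carry + (m - 1) * v - 1).toNat 1)
      else
        some (expandRuns runs ++ [carry + 1] ++
              List.replicate (carry + (c - 1 - 1) * carry - 1).toNat 1)

-- ===== PRECONDITION & SPEC =====
def Spec_next_part (part : List Int) (out : Option (List Int)) : Prop := out = next_part_alt part
instance (part : List Int) (out : Option (List Int)) : Decidable (Spec_next_part part out) := by unfold Spec_next_part; infer_instance

-- ===== CLAIM (what is proved, stated in full; the proofs are below) =====
def Claim_equal_next_part : Prop := ∀ (part : List Int), Dom_next_part part → Spec_next_part part (next_part part)

-- ===== LEMMAS AND PROOFS =====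

/-- length of the leading run of `v` in a list -/
def runlen (v : Int) : List Int → Nat
  | [] => 0
  | x :: xs => if x = v then runlen v xs + 1 else 0

/-- proof-only reference form of the result: pop carry from the reversed list, strip the run -/
def dropRunB (v : Int) : List Int → Int → List Int × Int
  | [], m => ([], m)
  | x :: xs, m => if x = v then dropRunB v xs (m + 1) else (x :: xs, m)

def nextPartRev (part : List Int) : Option (List Int) :=
  if part.length < 2 then none
  else
    match part.reverse with
    | [] => none
    | carry :: rest =>
      let v := rest.headD 0
      let pm := dropRunB v rest 0
      let ones := carry + (pm.2 - 1) * v - 1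
      some (pm.1.reverse ++ [v + 1] ++ List.replicate ones.toNat 1)

theorem runlen_le_length (v : Int) (l : List Int) : runlen v l ≤ l.length := by
  induction l with
  | nil => simp [runlen]
  | cons x xs ih => simp only [runlen, List.length_cons]; split <;> omega

theorem runlen_getElem (v : Int) (l : List Int) (k : Nat) (h : k < runlen v l) :
    l[k]'(lt_of_lt_of_le h (runlen_le_length v l)) = v := by
  induction l generalizing k with
  | nil => simp [runlen] at h
  | cons x xs ih =>
    simp only [runlen] at h
    split at h
    · cases k with
      | zero => simpa using ‹x = v›
      | succ k => simpa using ih k (by omega)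
    · omega

theorem take_runlen (v : Int) (l : List Int) :
    l.take (runlen v l) = List.replicate (runlen v l) v := by
  induction l with
  | nil => simp [runlen]
  | cons x xs ih =>
    simp only [runlen]
    by_cases h : x = v
    · simp [h, ih, List.replicate_succ]
    · simp [h]

theorem dropRunB_eq (v : Int) (l : List Int) : ∀ m : Int,
    dropRunB v l m = (l.drop (runlen v l), m + runlen v l) := by
  induction l with
  | nil => intro m; simp [dropRunB, runlen]
  | cons x xs ih =>
    intro m
    simp only [dropRunB, runlen]
    by_cases h : x = v
    · simp [h, ih]; ring
    · simp [h]

theorem rev_getD (part r : List Int) (h : r = part.reverse) (i : Nat) (hi : i < r.length) :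
    PySem.List.pyGetD part (-(i : Int) - 1) 0 = r[i] := by
  subst h
  have h1 : (-(i : Int) - 1) = -(((i + 1 : Nat)) : Int) := by push_cast; ring
  have hi' : i < part.length := by simpa using hi
  rw [h1, PySem.List.pyGetD_neg_natCast part (i + 1) 0 (by omega) (by simp; omega)]
  rw [List.getElem_reverse]
  congr 1; omega

theorem rev_slice (part r : List Int) (h : r = part.reverse) (k : Nat) (h0 : 0 < k) :
    PySem.List.slice part none (some (-(k : Int))) = (r.drop k).reverse := by
  subst h
  rw [PySem.List.slice_to_neg_natCast part k h0, List.reverse_drop]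
  simp

theorem loopA_eq (part : List Int) (prev : Int) (k : Nat) : ∀ (j : Nat) (cnt : Int),
    part.length ≤ j + k → 1 ≤ j →
    nextPartLoopA part prev (PySem.List.pyRange (j : Int) (part.length : Int) 1) cnt
      = cnt + runlen prev (part.reverse.drop j) := by
  induction k with
  | zero =>
    intro j cnt hle _
    have h1 : PySem.List.pyRange (j : Int) (part.length : Int) 1 = [] := by
      rw [PySem.List.pyRange_one]
      have : ((part.length : Int) - j).toNat = 0 := by omega
      simp [this]
    have h2 : part.reverse.drop j = [] := by
      apply List.drop_eq_nil_of_le; simp; omega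
    simp [h1, h2, nextPartLoopA, runlen]
  | succ k ih =>
    intro j cnt hle hj
    by_cases hlt : j < part.length
    · have hcons := PySem.List.pyRange_one_cons (a := (j : Int)) (b := (part.length : Int))
        (by exact_mod_cast hlt)
      rw [hcons]
      simp only [nextPartLoopA]
      have hidx := rev_getD part part.reverse rfl j (by simpa using hlt)
      have hdrop : part.reverse.drop j
          = part.reverse[j]'(by simpa using hlt) :: part.reverse.drop (j + 1) :=
        List.drop_eq_getElem_cons (by simpa using hlt)
      rw [hidx, hdrop]
      by_cases heq : part.reverse[j]'(by simpa using hlt) = prev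
      · rw [if_pos heq]
        have hj1 : ((j : Int) + 1) = ((j + 1 : Nat) : Int) := by push_cast; ring
        rw [hj1, ih (j + 1) (cnt + 1) (by omega) (by omega)]
        simp only [runlen]
        rw [if_pos heq]
        push_cast; ring
      · rw [if_neg heq]
        simp only [runlen]
        rw [if_neg heq]
        simp
    · have h1 : PySem.List.pyRange (j : Int) (part.length : Int) 1 = [] := by
        rw [PySem.List.pyRange_one]
        have : ((part.length : Int) - j).toNat = 0 := by omega
        simp [this]
      have h2 : part.reverse.drop j = [] := by
        apply List.drop_eq_nil_of_le; simp; omega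
      simp [h1, h2, nextPartLoopA, runlen]

theorem keyA (r : List Int) : next_part r.reverse = nextPartRev r.reverse := by
  match r with
  | [] => simp [next_part, nextPartRev]
  | [a] => simp [next_part, nextPartRev]
  | carry :: v :: rest =>
    set part := (carry :: v :: rest).reverse with hpart
    have hlen : part.length = rest.length + 2 := by simp [hpart]
    have hrev : carry :: v :: rest = part.reverse := by simp [hpart]
    set m0 := runlen v rest with hm0
    have hm0le : m0 ≤ rest.length := runlen_le_length v rest
    have hg1 : PySem.List.pyGetD part (-1) 0 = carry := by
      have h := rev_getD part _ hrev 0 (by simp)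
      simpa using h
    have hg2 : PySem.List.pyGetD part (-2) 0 = v := by
      have h := rev_getD part _ hrev 1 (by simp)
      norm_num at h
      exact h
    have hB : nextPartRev part
        = some ((rest.drop m0).reverse ++ [v + 1] ++
            List.replicate (carry + ((m0 : Int) + 1 - 1) * v - 1).toNat 1) := by
      rw [nextPartRev, if_neg (by omega), ← hrev]
      simp only [List.headD_cons]
      rw [show dropRunB v (v :: rest) 0 = (rest.drop m0, (m0 : Int) + 1) by
        rw [dropRunB_eq]
        simp [runlen, ← hm0]]
    rw [hB]
    rw [next_part, if_neg (by omega), hg1, hg2]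
    by_cases hc : carry = v
    · subst hc
      rw [if_pos rfl]
      have hloop : nextPartLoopA part carry (PySem.List.pyRange 1 (part.length : Int) 1) 1
          = 1 + ((m0 + 1 : Nat) : Int) := by
        have h := loopA_eq part carry part.length 1 1 (by omega) (by omega)
        rw [show ((1 : Nat) : Int) = (1 : Int) by norm_num] at h
        rw [h, ← hrev]
        simp [runlen, ← hm0]
      simp only [hloop]
      have hcnt : (1 + ((m0 + 1 : Nat) : Int)) = ((m0 + 2 : Nat) : Int) := by push_cast; ring
      rw [hcnt]
      have hsl := rev_slice part _ hrev (m0 + 2) (by omega)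
      have hgc : PySem.List.pyGetD part (-((m0 + 2 : Nat) : Int)) 0 = carry := by
        have h := rev_getD part _ hrev (m0 + 1) (by simp; omega)
        rw [show (-((m0 + 2 : Nat) : Int)) = (-((m0 + 1 : Nat) : Int) - 1) by push_cast; ring]
        rw [h, List.getElem_cons_succ]
        exact runlen_getElem carry (carry :: rest) m0 (by simp [runlen, ← hm0])
      rw [hsl, hgc]
      simp only [List.drop_succ_cons]
      congr 3
      congr 1
      push_cast; ring
    · rw [if_neg hc]
      have hloop : nextPartLoopA part v (PySem.List.pyRange 2 (part.length : Int) 1) 1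
          = 1 + ((m0 : Nat) : Int) := by
        have h := loopA_eq part v part.length 2 1 (by omega) (by omega)
        rw [show ((2 : Nat) : Int) = (2 : Int) by norm_num] at h
        rw [h, ← hrev]
        simp [← hm0]
      simp only [hloop]
      have hcnt2 : (-(1 + ((m0 : Nat) : Int)) - 1) = -((m0 + 2 : Nat) : Int) := by push_cast; ring
      rw [hcnt2]
      have hsl := rev_slice part _ hrev (m0 + 2) (by omega)
      rw [hsl]
      simp only [List.drop_succ_cons]
      congr 3
      congr 1
      ring

theorem addRun_concat (rs : List (Int × Int)) (v c x : Int) :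
    addRun (rs ++ [(v, c)]) x
      = if v = x then rs ++ [(v, c + 1)] else (rs ++ [(v, c)]) ++ [(x, 1)] := by
  simp [addRun]

/-- the forward RLE fold peels off exactly the trailing run -/
theorem foldl_addRun_last (l : List Int) : ∀ (t : Int) (rest : List Int),
    l.reverse = t :: rest →
    l.foldl addRun [] = ((rest.drop (runlen t rest)).reverse).foldl addRun []
      ++ [(t, (runlen t rest : Int) + 1)] := by
  induction l using List.reverseRecOn with
  | nil => intro t rest h; simp at h
  | append_singleton l' x ih =>
    intro t rest h
    rw [List.reverse_append] at h
    simp only [List.reverse_cons, List.reverse_nil, List.nil_append, List.singleton_append,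
      List.cons.injEq] at h
    obtain ⟨hx, hrest⟩ := h
    subst hx
    subst hrest
    rw [List.foldl_append]
    simp only [List.foldl_cons, List.foldl_nil]
    cases hl' : l'.reverse with
    | nil =>
      have hnil : l' = [] := by
        have := congrArg List.reverse hl'
        simpa using this
      subst hnil
      simp [addRun, runlen]
    | cons y rest' =>
      rw [ih y rest' hl', addRun_concat]
      by_cases hyx : y = x
      · subst hyx
        rw [if_pos rfl]
        have hrl : runlen y (y :: rest') = runlen y rest' + 1 := by simp [runlen]
        rw [hrl]
        have hdrop : (y :: rest').drop (runlen y rest' + 1) = rest'.drop (runlen y rest') := by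
          simp
        rw [hdrop]
        norm_cast
      · rw [if_neg hyx]
        simp only [runlen, if_neg hyx, List.drop_zero]
        have hrr : (y :: rest').reverse = l' := by
          have := congrArg List.reverse hl'
          simpa using this.symm
        rw [hrr, ih y rest' hl']
        simp

theorem expandRuns_concat (rs : List (Int × Int)) (p : Int × Int) :
    expandRuns (rs ++ [p]) = expandRuns rs ++ List.replicate p.2.toNat p.1 := by
  simp [expandRuns, List.foldl_append]

/-- expanding the RLE built by the fold gives back the list -/
theorem expandRuns_foldl (n : Nat) : ∀ (l : List Int), l.length ≤ n →
    expandRuns (l.foldl addRun []) = l := by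
  induction n with
  | zero =>
    intro l hl
    have : l = [] := by cases l <;> simp_all
    subst this
    simp [expandRuns]
  | succ n ih =>
    intro l hl
    cases hrev : l.reverse with
    | nil =>
      have : l = [] := by
        have := congrArg List.reverse hrev
        simpa using this
      subst this
      simp [expandRuns]
    | cons t rest =>
      have hlen : l.length = rest.length + 1 := by
        have := congrArg List.length hrev
        simpa using this
      set k := runlen t rest with hk
      have hkle : k ≤ rest.length := runlen_le_length t rest
      rw [foldl_addRun_last l t rest hrev, expandRuns_concat]
      rw [ih ((rest.drop k).reverse) (by simp; omega)]
      have htoNat : ((k : Int) + 1).toNat = k + 1 := by omega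
      rw [htoNat]
      have hl2 : l = rest.reverse ++ [t] := by
        have := congrArg List.reverse hrev
        simpa using this
      rw [hl2]
      have hsplit : rest.reverse = (rest.drop k).reverse ++ List.replicate k t := by
        conv_lhs => rw [← List.take_append_drop k rest]
        rw [List.reverse_append, take_runlen, List.reverse_replicate]
      rw [hsplit, List.append_assoc, ← List.replicate_succ']

/-- B's RLE pass computes the reference pop-and-strip form -/
theorem keyB (part : List Int) : next_part_alt part = nextPartRev part := by
  by_cases h2 : part.length < 2
  · rw [next_part_alt, if_pos h2, nextPartRev, if_pos h2]
  · cases hrev : part.reverse with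
    | nil =>
      exfalso
      have : part = [] := by
        have := congrArg List.reverse hrev
        simpa using this
      subst this
      simp at h2
    | cons t rest =>
      have hlen : part.length = rest.length + 1 := by
        have := congrArg List.length hrev
        simpa using this
      have hrestne : rest ≠ [] := by
        intro h
        subst h
        simp at hlen
        omega
      rw [next_part_alt, if_neg h2, nextPartRev, if_neg h2, hrev]
      simp only [foldl_addRun_last part t rest hrev, List.getLast?_concat,
        List.dropLast_concat]
      set k := runlen t rest with hk
      by_cases hk0 : k = 0
      · -- trailing element is alone in its run
        rw [if_pos (show ((k : Int) + 1) = 1 by rw [hk0]; norm_num)]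
        cases rest with
        | nil => exact absurd rfl hrestne
        | cons v rest2 =>
          have hvt : v ≠ t := by
            intro hvt
            rw [hk] at hk0
            simp [runlen, hvt] at hk0
          rw [hk0]
          simp only [List.drop_zero]
          have hrr : (v :: rest2).reverse.reverse = v :: rest2 := by simp
          simp only [foldl_addRun_last ((v :: rest2).reverse) v rest2 hrr,
            List.getLast?_concat, List.dropLast_concat]
          set k2 := runlen v rest2 with hk2
          rw [expandRuns_foldl ((rest2.drop k2).reverse).length _ le_rfl]
          simp only [List.headD_cons]
          rw [dropRunB_eq]
          have hrl2 : runlen v (v :: rest2) = k2 + 1 := by rw [hk2]; simp [runlen]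
          rw [hrl2]
          simp only [List.drop_succ_cons]
          congr 3
          push_cast
          ring_nf
      · -- trailing run has length ≥ 2
        rw [if_neg (show ¬ ((k : Int) + 1) = 1 by omega)]
        rw [expandRuns_foldl ((rest.drop k).reverse).length _ le_rfl]
        cases rest with
        | nil => exact absurd rfl hrestne
        | cons y rest2 =>
          have hyt : y = t := by
            by_contra hyt
            apply hk0
            rw [hk]
            simp [runlen, hyt]
          subst hyt
          simp only [List.headD_cons]
          rw [dropRunB_eq]
          simp only [← hk]
          congr 3
          ring_nf

-- ===== VERDICT (by name: the statement is the Claim_ definition above) =====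
theorem next_part_spec : Claim_equal_next_part := by
  intro part _
  unfold Spec_next_part
  rw [keyB]
  have h := keyA part.reverse
  simpa using h
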